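-- pv_equiv track=rewrite | github.com/sk789-sk/algo-prac | leetcode/leetcode_75/Stack/2390_Removing_stars_from_String.py | removestar
-- ===== SOURCE A (Python) =====
-- def removestar(s):
--     output = ''
--     for val in s:
--         if val !='*':
--             output+=val
--         else:
--             output = output[:-1]
--     return output
-- ===== SOURCE B (Python) =====
-- def removestar(s):
--     skip = 0
--     kept = []
--     for ch in reversed(s):
--         if ch == '*':
--             skip += 1
--         elif skip > 0:
--             skip -= 1
--         else:
--             kept.append(ch)
--     kept.reverse()
--     return ''.join(kept)
-- ===== Notes on version B (the rewrite author's own statement) =====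
-- stated objective: alternative
-- what changed: Replaces the forward stack-building pass (append char / slice off last on '*') with a single reverse pass keeping a skip counter: stars increment it, consumed characters decrement it, surviving characters are collected and reversed at the end.
import Mathlib
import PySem

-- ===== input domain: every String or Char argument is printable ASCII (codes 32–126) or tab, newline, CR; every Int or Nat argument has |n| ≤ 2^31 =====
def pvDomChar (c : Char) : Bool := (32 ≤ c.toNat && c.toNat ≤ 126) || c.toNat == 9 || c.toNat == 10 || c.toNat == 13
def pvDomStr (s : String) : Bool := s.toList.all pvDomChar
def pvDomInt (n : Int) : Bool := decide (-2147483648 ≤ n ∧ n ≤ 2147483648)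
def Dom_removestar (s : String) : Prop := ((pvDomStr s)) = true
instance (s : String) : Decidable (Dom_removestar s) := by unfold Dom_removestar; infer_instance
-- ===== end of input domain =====

-- B replaces A's forward stack-building pass (append / slice off last char on '*')
-- with a single reverse pass keeping a skip counter; objective: alternative algorithm.


-- ===== PORT A =====
-- output[:-1] is ported exactly by PySem.List.slice with bound -1
def removestar (s : String) : String :=
  String.mk (s.toList.foldl
    (fun out c => if c ≠ '*' then out ++ [c] else PySem.List.slice out none (some (-1))) [])

-- ===== PORT B =====
-- reverse pass: '*' bumps the skip counter, a skipped char consumes one, otherwise keep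
def rsLoop : List Char → Nat → List Char → List Char
  | [], _, kept => kept
  | c :: rest, skip, kept =>
    if c = '*' then rsLoop rest (skip + 1) kept
    else if skip > 0 then rsLoop rest (skip - 1) kept
    else rsLoop rest skip (kept ++ [c])

def removestar_alt (s : String) : String :=
  String.mk ((rsLoop s.toList.reverse 0 []).reverse)

-- ===== PRECONDITION & SPEC =====
def Spec_removestar (s : String) (out : String) : Prop := out = removestar_alt s
instance (s : String) (out : String) : Decidable (Spec_removestar s out) := by unfold Spec_removestar; infer_instance

-- ===== CLAIM (what is proved, stated in full; the proofs are below) =====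
def Claim_equal_removestar : Prop := ∀ (s : String), Dom_removestar s → Spec_removestar s (removestar s)

-- ===== LEMMAS AND PROOFS =====
def rsFold (l : List Char) : List Char :=
  l.foldl (fun out c => if c ≠ '*' then out ++ [c] else PySem.List.slice out none (some (-1))) []

theorem rsLoop_acc (m : List Char) : ∀ (skip : Nat) (kept : List Char),
    rsLoop m skip kept = kept ++ rsLoop m skip [] := by
  induction m with
  | nil => intro skip kept; simp [rsLoop]
  | cons c rest ih =>
    intro skip kept
    simp only [rsLoop]
    split_ifs with h hs
    · exact ih _ _
    · exact ih _ _
    · rw [ih skip (kept ++ [c]), ih skip ([] ++ [c])]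
      simp

theorem rsLoop_spec (m : List Char) : ∀ (skip : Nat),
    rsLoop m skip [] =
      ((rsFold m.reverse).take ((rsFold m.reverse).length - skip)).reverse := by
  induction m with
  | nil => intro skip; simp [rsLoop, rsFold]
  | cons c rest ih =>
    intro skip
    have hstep : rsFold (c :: rest).reverse =
        (fun out c => if c ≠ '*' then out ++ [c] else PySem.List.slice out none (some (-1)))
          (rsFold rest.reverse) c := by
      simp [rsFold, List.foldl_append]
    set L := rsFold rest.reverse with hL
    by_cases h : c = '*'
    · have hd : rsFold (c :: rest).reverse = L.dropLast := by
        rw [hstep]; simp [h, PySem.List.slice_to_neg_one]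
      rw [hd]
      simp only [rsLoop, h, if_pos]
      rw [ih (skip + 1)]
      congr 1
      rw [List.dropLast_eq_take, List.take_take, List.length_take]
      congr 1
      omega
    · have hne : rsFold (c :: rest).reverse = L ++ [c] := by
        rw [hstep]; simp [h]
      rw [hne]
      simp only [rsLoop, if_neg h]
      by_cases hs : skip > 0
      · rw [if_pos hs, ih (skip - 1)]
        congr 1
        rw [List.length_append, List.length_cons, List.length_nil]
        rw [List.take_append_of_le_length (by omega)]
        congr 1
        omega
      · rw [if_neg hs]
        have hs0 : skip = 0 := by omega
        subst hs0
        rw [rsLoop_acc, ih 0]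
        rw [show (L ++ [c]).length - 0 = (L ++ [c]).length from rfl, List.take_length]
        simp

theorem removestar_spec : Claim_equal_removestar := by
  intro s _
  unfold Spec_removestar removestar removestar_alt
  rw [rsLoop_spec s.toList.reverse 0]
  simp [rsFold]
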